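-- pv_equiv track=rewrite | github.com/qorzj/damahouzi | util/page.py | pair_list
-- ===== SOURCE A (Python) =====
-- end = None
--
-- def pair_list(lst):
--     i = 0
--     for y in lst:
--         i += 1
--         if i & 1:
--             x = y
--         else:
--             yield x, y
--     end
-- ===== SOURCE B (Python) =====
-- def pair_list(lst):
--     evens = lst[0::2]
--     odds = lst[1::2]
--     yield from zip(evens, odds)
-- ===== Notes on version B (the rewrite author's own statement) =====
-- stated objective: alternative
-- what changed: Replaces A's single stateful parity loop (counter plus stashed element) by two staged stride-2 slices (even-index and odd-index elements) zipped together; the trailing unpaired element drops out because zip stops at the shorter slice.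
import Mathlib
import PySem

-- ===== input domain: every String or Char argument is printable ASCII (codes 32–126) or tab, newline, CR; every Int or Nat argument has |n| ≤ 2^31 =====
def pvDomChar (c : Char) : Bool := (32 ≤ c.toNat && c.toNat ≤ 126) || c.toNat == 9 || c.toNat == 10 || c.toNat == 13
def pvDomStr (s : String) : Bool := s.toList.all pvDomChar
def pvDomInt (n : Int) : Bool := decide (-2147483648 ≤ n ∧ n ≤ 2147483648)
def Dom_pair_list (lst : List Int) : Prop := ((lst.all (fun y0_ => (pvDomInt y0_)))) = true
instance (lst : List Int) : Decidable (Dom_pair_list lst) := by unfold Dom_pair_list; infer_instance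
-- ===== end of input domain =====

-- B replaces A's single stateful parity loop by two staged stride-2 slices zipped
-- together (same O(n) cost, an alternative decomposition).


-- ===== PORT A =====
-- State (i, x, acc): counter i, last stashed even-position element x (initial value
-- never read before first write, since i becomes 1/odd on the first element), yielded acc.
-- Python's 'i & 1' on the nonnegative counter i is exactly 'i % 2 == 1'.
def pair_list (lst : List Int) : List (Int × Int) :=
  (lst.foldl
    (fun (s : Int × Int × List (Int × Int)) y =>
      let i := s.1 + 1
      if i % 2 = 1 then (i, y, s.2.2) else (i, s.2.1, s.2.2 ++ [(s.2.1, y)]))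
    (0, 0, [])).2.2

-- ===== PORT B =====
-- stride2 is the hand port of the step-2 slice lst[0::2] (PySem.List.slice has no
-- step parameter): it keeps every second element starting at the head — exact.
def stride2 : List Int → List Int
  | [] => []
  | [a] => [a]
  | a :: _ :: rest => a :: stride2 rest

-- evens = lst[0::2]; odds = lst[1::2] (= stride2 of the tail); zip stops at the shorter.
def pair_list_alt (lst : List Int) : List (Int × Int) :=
  List.zip (stride2 lst) (stride2 lst.tail)

-- ===== PRECONDITION & SPEC =====
def Spec_pair_list (lst : List Int) (out : List (Int × Int)) : Prop := out = pair_list_alt lst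
instance (lst : List Int) (out : List (Int × Int)) : Decidable (Spec_pair_list lst out) := by unfold Spec_pair_list; infer_instance

-- ===== CLAIM (what is proved, stated in full; the proofs are below) =====
def Claim_equal_pair_list : Prop := ∀ (lst : List Int), Dom_pair_list lst → Spec_pair_list lst (pair_list lst)

-- ===== LEMMAS AND PROOFS =====

-- B's zip of the two stride-2 slices is the two-at-a-time pairing.
theorem alt_pairs : ∀ (lst : List Int),
    pair_list_alt lst = match lst with
      | a :: b :: rest => (a, b) :: pair_list_alt rest
      | _ => []
  | [] => by simp [pair_list_alt, stride2]
  | [a] => by simp [pair_list_alt, stride2]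
  | a :: b :: rest => by
    cases rest with
    | nil => simp [pair_list_alt, stride2]
    | cons c rest' => simp [pair_list_alt, stride2, List.zip]

-- A's fold from an even counter appends exactly B's pairs.
theorem pair_list_key : ∀ (lst : List Int) (i x : Int) (acc : List (Int × Int)),
    i % 2 = 0 →
    (lst.foldl
      (fun (s : Int × Int × List (Int × Int)) y =>
        let i := s.1 + 1
        if i % 2 = 1 then (i, y, s.2.2) else (i, s.2.1, s.2.2 ++ [(s.2.1, y)]))
      (i, x, acc)).2.2 = acc ++ pair_list_alt lst
  | [], i, x, acc, _ => by simp [pair_list_alt, stride2]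
  | [a], i, x, acc, h => by
    have h1 : (i + 1) % 2 = 1 := by omega
    simp [pair_list_alt, stride2, List.foldl, h1]
  | a :: b :: rest, i, x, acc, h => by
    have h1 : (i + 1) % 2 = 1 := by omega
    have h2 : (i + 1 + 1) % 2 ≠ 1 := by omega
    have h3 : (i + 1 + 1) % 2 = 0 := by omega
    simp only [List.foldl, h1, if_pos, if_neg h2]
    rw [alt_pairs (a :: b :: rest)]
    have := pair_list_key rest (i + 1 + 1) a (acc ++ [(a, b)]) h3
    simpa using this

-- ===== VERDICT (by name: the statement is the Claim_ definition above) =====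
theorem pair_list_spec : Claim_equal_pair_list := by
  intro lst _
  unfold Spec_pair_list pair_list
  simpa using pair_list_key lst 0 0 [] (by decide)
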